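-- pv_equiv track=rewrite | github.com/GeorgianBadita/University | Semester1/Fundamentals of Programming/probleme/lab3/lab3.py | longestCommonDigits
-- ===== SOURCE A (Python) =====
-- def commonDigits(a, b):
--     '''
--     Check if numbers a and b have at least 2 distinct common digits
--     a, b - numbers, integers
--     return True if a and b have at least 2 distinct common digits otherwise
--     False
--     '''
--     if a < 0:
--         a *= -1
--     if b < 0:
--         b *= -1
--     newA = 0
--     while a:
--         newA |= (1 << a % 10)
--         a //= 10
--     newB = 0
--     while b:
--         newB |= (1 << b % 10)
--         b //= 10
--
--     checkNumber = newA & newB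
--     bitCount = 0
--     while checkNumber:
--         bitCount += 1
--         checkNumber = checkNumber & (checkNumber - 1)
--
--     return bitCount >= 2
--
-- def longestCommonDigits(myList):
--     '''
--     Find the longest sequence of numbers which have at least 2 common distinct digits
--     myList - list of integers
--     return a list representing the longest sequence of number
--     with at least 2 common distinct digits
--     '''
--     maxLength = 0
--     position = 0
--     for i in range(0, len(myList)):
--         length = 0
--         while i + 1 < len(myList) and commonDigits(myList[i], myList[i + 1]) == True:
--             length += 1
--             i += 1
--         if length > maxLength:
--             position = i
--             maxLength = length
--
--     if maxLength <= 0: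
--         return []
--
--     return myList[position - maxLength:position + 1]
-- ===== SOURCE B (Python) =====
-- def longestCommonDigits(myList):
--     """Single pass: compute each number's digit set once, then scan adjacent
--     pairs keeping the first maximal run (O(n) instead of A's restart-per-index scan)."""
--     def digits(n):
--         n = abs(n)
--         s = set()
--         while n:
--             s.add(n % 10)
--             n //= 10
--         return s
--
--     ds = [digits(x) for x in myList]
--     best_len = 0
--     best_end = 0
--     cur = 0
--     for i in range(1, len(myList)):
--         if len(ds[i - 1] & ds[i]) >= 2:
--             cur += 1
--             if cur > best_len:
--                 best_len = cur
--                 best_end = i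
--         else:
--             cur = 0
--     if best_len == 0:
--         return []
--     return myList[best_end - best_len : best_end + 1]
-- ===== Notes on version B (the rewrite author's own statement) =====
-- stated objective: faster
-- what changed: Replaces A's restart-a-fresh-inner-scan-from-every-index outer loop (and its repeated digit-mask recomputation) by a single left-to-right pass that precomputes each number's digit set once and tracks the current/best run of adjacent pairs sharing 2+ digits.
import Mathlib
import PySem

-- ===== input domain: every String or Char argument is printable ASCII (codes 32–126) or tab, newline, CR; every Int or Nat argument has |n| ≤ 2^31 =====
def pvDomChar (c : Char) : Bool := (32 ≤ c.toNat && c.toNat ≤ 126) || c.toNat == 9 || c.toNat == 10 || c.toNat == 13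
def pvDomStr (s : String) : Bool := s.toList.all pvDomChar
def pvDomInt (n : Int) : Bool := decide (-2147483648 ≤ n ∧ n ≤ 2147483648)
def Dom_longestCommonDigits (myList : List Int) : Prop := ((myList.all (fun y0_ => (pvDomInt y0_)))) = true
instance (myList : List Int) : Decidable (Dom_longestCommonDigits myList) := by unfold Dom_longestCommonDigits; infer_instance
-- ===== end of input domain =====

-- B replaces A's restart-from-every-index quadratic scan (which also recomputes digit
-- masks repeatedly) by one pass that precomputes each number's digit set once and
-- tracks the current and first-best run of adjacent matching pairs.

-- ===== PORT A =====
-- A's `while a: newA |= 1 << a % 10; a //= 10` — runs on a nonnegative int (A takes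
-- the absolute value first), where Nat `/`, `%`, `|||`, `<<<` are Python-exact.
def pyDigitMask (a : Nat) (acc : Nat) : Nat :=
  if a ≠ 0 then pyDigitMask (a / 10) (acc ||| (1 <<< (a % 10))) else acc
termination_by a
decreasing_by exact Nat.div_lt_self (Nat.pos_of_ne_zero (by assumption)) (by omega)

-- A's `while checkNumber: bitCount += 1; checkNumber &= checkNumber - 1` (nonneg int).
def pyBitCount (c : Nat) (cnt : Nat) : Nat :=
  if c ≠ 0 then pyBitCount (c &&& (c - 1)) (cnt + 1) else cnt
termination_by c
decreasing_by
  exact Nat.lt_of_le_of_lt Nat.and_le_right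
    (Nat.sub_lt (Nat.pos_of_ne_zero (by assumption)) one_pos)

def commonDigitsPy (a b : Int) : Bool :=
  let a := if a < 0 then a * -1 else a
  let b := if b < 0 then b * -1 else b
  let newA := pyDigitMask a.toNat 0    -- a ≥ 0 here, so .toNat is exact
  let newB := pyDigitMask b.toNat 0
  let checkNumber := newA &&& newB
  decide (2 ≤ pyBitCount checkNumber 0)

-- A's inner `while i + 1 < len(myList) and commonDigits(...)` (i, length start fresh
-- each outer iteration; indices are in range whenever read, so getD's default is inert).
def aInner (l : List Int) (i : Nat) (length : Nat) : Nat × Nat :=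
  if h : i + 1 < l.length ∧ commonDigitsPy (l.getD i 0) (l.getD (i + 1) 0) = true then
    aInner l (i + 1) (length + 1)
  else (i, length)
termination_by l.length - i
decreasing_by omega

-- A's outer `for i in range(0, len(myList))` with state (maxLength, position);
-- both are always ≥ 0 in Python, so Nat counters are exact.
def aOuter (l : List Int) (i : Nat) (maxLength : Nat) (position : Nat) : Nat × Nat :=
  if i < l.length then
    let p := aInner l i 0
    if p.2 > maxLength then aOuter l (i + 1) p.2 p.1
    else aOuter l (i + 1) maxLength position
  else (maxLength, position)
termination_by l.length - i
decreasing_by all_goals omega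

def longestCommonDigits (myList : List Int) : List Int :=
  let p := aOuter myList 0 0 0
  if p.1 ≤ 0 then []
  else PySem.List.slice myList (some ((p.2 : Int) - (p.1 : Int))) (some ((p.2 : Int) + 1))

-- ===== PORT B =====
-- Source B's digits(): `n = abs(n); while n: s.add(n % 10); n //= 10`.
def bDigitsLoop (n : Nat) (s : PySem.Set Nat) : PySem.Set Nat :=
  if n ≠ 0 then bDigitsLoop (n / 10) (PySem.Set.add s (n % 10)) else s
termination_by n
decreasing_by exact Nat.div_lt_self (Nat.pos_of_ne_zero (by assumption)) (by omega)

def bDigits (x : Int) : PySem.Set Nat := bDigitsLoop x.natAbs PySem.Set.empty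

-- Source B's `for i in range(1, len(myList))` with state (best_len, best_end, cur);
-- ds indices are in range whenever read, so getD's default is inert.
def bLoop (l : List Int) (ds : List (PySem.Set Nat)) (i : Nat)
    (bestLen bestEnd cur : Nat) : Nat × Nat :=
  if i < l.length then
    if 2 ≤ PySem.Set.len
        (PySem.Set.inter (ds.getD (i - 1) PySem.Set.empty) (ds.getD i PySem.Set.empty)) then
      if cur + 1 > bestLen then bLoop l ds (i + 1) (cur + 1) i (cur + 1)
      else bLoop l ds (i + 1) bestLen bestEnd (cur + 1)
    else bLoop l ds (i + 1) bestLen bestEnd 0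
  else (bestLen, bestEnd)
termination_by l.length - i
decreasing_by all_goals omega

def longestCommonDigits_alt (myList : List Int) : List Int :=
  let ds := myList.map bDigits
  let p := bLoop myList ds 1 0 0 0
  if p.1 = 0 then []
  else PySem.List.slice myList (some ((p.2 : Int) - (p.1 : Int))) (some ((p.2 : Int) + 1))

-- ===== PRECONDITION & SPEC =====
def Spec_longestCommonDigits (myList : List Int) (out : List Int) : Prop := out = longestCommonDigits_alt myList
instance (myList : List Int) (out : List Int) : Decidable (Spec_longestCommonDigits myList out) := by unfold Spec_longestCommonDigits; infer_instance

-- ===== CLAIM (what is proved, stated in full; the proofs are below) =====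
def Claim_equal_longestCommonDigits : Prop := ∀ (myList : List Int), Dom_longestCommonDigits myList → Spec_longestCommonDigits myList (longestCommonDigits myList)

-- ===== LEMMAS AND PROOFS =====

-- ---- the pair predicate and the run length starting at a pair index ----

def pairMatch (l : List Int) (j : Nat) : Bool :=
  decide (j + 1 < l.length) && commonDigitsPy (l.getD j 0) (l.getD (j + 1) 0)

def runLen (l : List Int) (j : Nat) : Nat :=
  if h : pairMatch l j = true then runLen l (j + 1) + 1 else 0
termination_by l.length - j
decreasing_by
  · have : j + 1 < l.length := by
      have := h; simp only [pairMatch, Bool.and_eq_true, decide_eq_true_eq] at this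
      exact this.1
    omega

lemma runLen_of_false {l : List Int} {j : Nat} (h : pairMatch l j = false) :
    runLen l j = 0 := by rw [runLen]; simp [h]

lemma runLen_of_true {l : List Int} {j : Nat} (h : pairMatch l j = true) :
    runLen l j = runLen l (j + 1) + 1 := by rw [runLen]; simp [h]

lemma pairMatch_of_oob {l : List Int} {j : Nat} (h : ¬ j + 1 < l.length) :
    pairMatch l j = false := by simp [pairMatch]; omega

lemma pairMatch_true_of {l : List Int} {j : Nat}
    (h1 : j + 1 < l.length) (h2 : commonDigitsPy (l.getD j 0) (l.getD (j + 1) 0) = true) :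
    pairMatch l j = true := by
  simp only [pairMatch, h2, Bool.and_true, decide_eq_true_eq]; exact h1

lemma aInner_eq (l : List Int) : ∀ (k i len : Nat), l.length - i ≤ k →
    aInner l i len = (i + runLen l i, len + runLen l i) := by
  intro k
  induction k with
  | zero =>
    intro i len hk
    have hm : pairMatch l i = false := pairMatch_of_oob (by omega)
    rw [aInner, dif_neg (by intro hc; exact absurd hc.1 (by omega)), runLen_of_false hm]
    simp
  | succ k ih =>
    intro i len hk
    by_cases h : i + 1 < l.length ∧ commonDigitsPy (l.getD i 0) (l.getD (i + 1) 0) = true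
    · have hm : pairMatch l i = true := pairMatch_true_of h.1 h.2
      rw [aInner, dif_pos h, ih (i + 1) (len + 1) (by omega), runLen_of_true hm]
      simp only [Prod.mk.injEq]; omega
    · have hm : pairMatch l i = false := by
        by_cases h1 : i + 1 < l.length
        · have h2 : commonDigitsPy (l.getD i 0) (l.getD (i + 1) 0) = false := by
            cases hc : commonDigitsPy (l.getD i 0) (l.getD (i + 1) 0)
            · rfl
            · exact absurd ⟨h1, hc⟩ h
          simp only [pairMatch, h2, Bool.and_false]
        · exact pairMatch_of_oob h1
      rw [aInner, dif_neg h, runLen_of_false hm]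
      simp


-- ---- Kernighan bit-count loop: pyBitCount computes the number of set bits ----

def bcnt (c : Nat) : Nat := if c ≠ 0 then c % 2 + bcnt (c / 2) else 0
termination_by c
decreasing_by exact Nat.div_lt_self (Nat.pos_of_ne_zero (by assumption)) (by omega)

lemma bcnt_zero : bcnt 0 = 0 := by rw [bcnt]; simp

lemma bcnt_even (k : Nat) : bcnt (2 * k) = bcnt k := by
  by_cases hk : k = 0
  · subst hk; norm_num
  · rw [bcnt, if_pos (by omega)]
    have h1 : 2 * k % 2 = 0 := by omega
    have h2 : 2 * k / 2 = k := by omega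
    rw [h1, h2, Nat.zero_add]

lemma bcnt_odd (k : Nat) : bcnt (2 * k + 1) = bcnt k + 1 := by
  rw [bcnt, if_pos (by omega)]
  have h1 : (2 * k + 1) % 2 = 1 := by omega
  have h2 : (2 * k + 1) / 2 = k := by omega
  rw [h1, h2]; omega

lemma and_pred_odd (k : Nat) : (2 * k + 1) &&& (2 * k) = 2 * k := by
  apply Nat.eq_of_testBit_eq; intro i
  cases i with
  | zero =>
    rw [Nat.testBit_and]
    simp only [Nat.testBit_zero]
    have h : 2 * k % 2 = 0 := by omega
    rw [h]; simp
  | succ i =>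
    rw [Nat.testBit_and]
    simp only [Nat.testBit_succ]
    have h1 : (2 * k + 1) / 2 = k := by omega
    have h2 : 2 * k / 2 = k := by omega
    rw [h1, h2, Bool.and_self]

lemma and_pred_even (k : Nat) :
    (2 * k) &&& (2 * k - 1) = 2 * (k &&& (k - 1)) := by
  apply Nat.eq_of_testBit_eq; intro i
  cases i with
  | zero =>
    rw [Nat.testBit_and]
    simp only [Nat.testBit_zero]
    have h1 : 2 * k % 2 = 0 := by omega
    have h2 : 2 * (k &&& (k - 1)) % 2 = 0 := by omega
    rw [h1, h2]; simp
  | succ i =>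
    rw [Nat.testBit_and]
    simp only [Nat.testBit_succ]
    have h1 : 2 * k / 2 = k := by omega
    have h2 : (2 * k - 1) / 2 = k - 1 := by omega
    have h3 : 2 * (k &&& (k - 1)) / 2 = k &&& (k - 1) := by omega
    rw [h1, h2, h3, Nat.testBit_and]

lemma bcnt_and_pred : ∀ c, c ≠ 0 → bcnt (c &&& (c - 1)) + 1 = bcnt c := by
  intro c
  induction c using Nat.strong_induction_on with
  | _ c ih =>
    intro hc
    by_cases hodd : c % 2 = 1
    · obtain ⟨k, hk⟩ : ∃ k, c = 2 * k + 1 := ⟨c / 2, by omega⟩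
      subst hk
      rw [show 2 * k + 1 - 1 = 2 * k by omega, and_pred_odd, bcnt_even, bcnt_odd]
    · obtain ⟨k, hk⟩ : ∃ k, c = 2 * k := ⟨c / 2, by omega⟩
      subst hk
      have hk0 : k ≠ 0 := by omega
      rw [and_pred_even k, bcnt_even]
      have h1 := ih k (by omega) hk0
      have h2 : bcnt (2 * k) = bcnt k := bcnt_even k
      omega

lemma pyBitCount_eq_bcnt : ∀ c cnt, pyBitCount c cnt = cnt + bcnt c := by
  intro c
  induction c using Nat.strong_induction_on with
  | _ c ih =>
    intro cnt
    by_cases hc : c = 0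
    · subst hc; rw [pyBitCount, bcnt]; simp
    · rw [pyBitCount, if_pos hc]
      have hlt : c &&& (c - 1) < c :=
        Nat.lt_of_le_of_lt Nat.and_le_right (Nat.sub_lt (Nat.pos_of_ne_zero hc) one_pos)
      rw [ih _ hlt (cnt + 1)]
      have := bcnt_and_pred c hc
      omega

lemma bcnt_card : ∀ (k : Nat) (x : Nat), x < 2 ^ k →
    bcnt x = ((List.range k).filter (fun d => x.testBit d)).length := by
  intro k
  induction k with
  | zero =>
    intro x hx
    have : x = 0 := by simpa using hx
    subst this
    rw [bcnt_zero]; rfl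
  | succ k ih =>
    intro x hx
    by_cases hx0 : x = 0
    · subst hx0; rw [bcnt_zero]; simp [Nat.zero_testBit]
    · rw [bcnt, if_pos hx0]
      have hdiv : x / 2 < 2 ^ k := by
        have : (2 : Nat) ^ (k + 1) = 2 ^ k * 2 := by ring
        omega
      rw [ih (x / 2) hdiv, List.range_succ_eq_map, List.filter_cons, List.filter_map]
      have hcongr : List.filter ((fun d => x.testBit d) ∘ Nat.succ) (List.range k)
          = List.filter (fun d => (x / 2).testBit d) (List.range k) := by
        apply List.filter_congr; intro a _
        simp [Function.comp, Nat.testBit_succ]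
      have h0 : x.testBit 0 = decide (x % 2 = 1) := Nat.testBit_zero ..
      by_cases hb : x.testBit 0 = true
      · rw [if_pos hb, List.length_cons, List.length_map, hcongr]
        rw [h0] at hb
        have : x % 2 = 1 := by simpa using hb
        omega
      · rw [if_neg hb, List.length_map, hcongr]
        rw [h0] at hb
        have : x % 2 = 0 := by
          rcases Nat.mod_two_eq_zero_or_one x with h | h
          · exact h
          · exact absurd (by simp [h]) hb
        omega


-- ---- A's digit bitmask and B's digit set contain the same digits ----

lemma shiftBit (k d : Nat) : ((1 <<< k).testBit d = true) ↔ d = k := by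
  rw [Nat.one_shiftLeft, Nat.testBit_two_pow]
  simp [eq_comm]

lemma maskMem : ∀ (n : Nat) (acc : Nat) (s : PySem.Set Nat),
    (∀ e, acc.testBit e = true ↔ e ∈ s) →
    ∀ d, ((pyDigitMask n acc).testBit d = true ↔ d ∈ bDigitsLoop n s) := by
  intro n
  induction n using Nat.strong_induction_on with
  | _ n ih =>
    intro acc s hs d
    by_cases hn : n = 0
    · subst hn
      rw [pyDigitMask, if_neg (by simp), bDigitsLoop, if_neg (by simp)]
      exact hs d
    · rw [pyDigitMask, if_pos hn, bDigitsLoop, if_pos hn]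
      refine ih (n / 10) (Nat.div_lt_self (Nat.pos_of_ne_zero hn) (by omega)) _ _ ?_ d
      intro e
      rw [Nat.testBit_or, PySem.Set.mem_add, Bool.or_eq_true, shiftBit, hs e]

lemma bDigitsLoop_nodup : ∀ (n : Nat) (s : PySem.Set Nat),
    s.Nodup → (bDigitsLoop n s).Nodup := by
  intro n
  induction n using Nat.strong_induction_on with
  | _ n ih =>
    intro s hs
    by_cases hn : n = 0
    · subst hn; rw [bDigitsLoop, if_neg (by simp)]; exact hs
    · rw [bDigitsLoop, if_pos hn]
      exact ih (n / 10) (Nat.div_lt_self (Nat.pos_of_ne_zero hn) (by omega)) _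
        (PySem.Set.nodup_add s (n % 10) hs)

lemma maskLt : ∀ (n : Nat) (acc : Nat), acc < 1024 → pyDigitMask n acc < 1024 := by
  intro n
  induction n using Nat.strong_induction_on with
  | _ n ih =>
    intro acc hacc
    by_cases hn : n = 0
    · subst hn; rw [pyDigitMask, if_neg (by simp)]; exact hacc
    · rw [pyDigitMask, if_pos hn]
      refine ih (n / 10) (Nat.div_lt_self (Nat.pos_of_ne_zero hn) (by omega)) _ ?_
      have h1 : (1 : Nat) <<< (n % 10) < 2 ^ 10 := by
        rw [Nat.one_shiftLeft]
        exact Nat.pow_lt_pow_right (by omega) (Nat.mod_lt _ (by omega))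
      have h2 : acc < 2 ^ 10 := by norm_num at *; omega
      have := Nat.or_lt_two_pow h2 h1
      norm_num at this ⊢
      omega

lemma bDigits_mem (x : Int) (d : Nat) :
    d ∈ bDigits x ↔ (pyDigitMask x.natAbs 0).testBit d = true := by
  rw [bDigits]
  exact (maskMem x.natAbs 0 PySem.Set.empty (by simp [PySem.Set.empty, Nat.zero_testBit]) d).symm

-- ---- the two adjacent-pair tests agree ----

lemma commonDigits_eq (a b : Int) :
    commonDigitsPy a b
      = decide (2 ≤ PySem.Set.len (PySem.Set.inter (bDigits a) (bDigits b))) := by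
  have habs : ∀ x : Int, (if x < 0 then x * -1 else x).toNat = x.natAbs := by
    intro x; split_ifs <;> omega
  simp only [commonDigitsPy, habs]
  set mA := pyDigitMask a.natAbs 0 with hmA
  set mB := pyDigitMask b.natAbs 0 with hmB
  have hmAlt : mA < 1024 := maskLt _ 0 (by omega)
  have hle : mA &&& mB ≤ mA := Nat.and_le_left
  have hand : mA &&& mB < 2 ^ 10 := by norm_num; omega
  suffices hNat : pyBitCount (mA &&& mB) 0
      = (PySem.Set.inter (bDigits a) (bDigits b)).length by
    have hlen : PySem.Set.len (PySem.Set.inter (bDigits a) (bDigits b))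
        = ((PySem.Set.inter (bDigits a) (bDigits b)).length : Int) := rfl
    rw [hlen, ← hNat]
    refine decide_eq_decide.mpr ?_
    constructor
    · intro h; exact_mod_cast h
    · intro h; exact_mod_cast h
  rw [pyBitCount_eq_bcnt, Nat.zero_add, bcnt_card 10 _ hand]
  have hnodF : ((List.range 10).filter (fun d => (mA &&& mB).testBit d)).Nodup :=
    (List.nodup_range).filter _
  have hnodI : (PySem.Set.inter (bDigits a) (bDigits b)).Nodup :=
    PySem.Set.nodup_inter _ _ (bDigitsLoop_nodup _ _ (by simp [PySem.Set.empty]))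
  refine List.Perm.length_eq ((List.perm_ext_iff_of_nodup hnodF hnodI).mpr ?_)
  intro d
  rw [List.mem_filter, List.mem_range, PySem.Set.mem_inter, bDigits_mem, bDigits_mem,
      ← hmA, ← hmB]
  constructor
  · rintro ⟨-, hbit⟩
    rw [Nat.testBit_and, Bool.and_eq_true] at hbit
    exact hbit
  · rintro ⟨h1, h2⟩
    have hbit : (mA &&& mB).testBit d = true := by rw [Nat.testBit_and, h1, h2]; rfl
    refine ⟨?_, hbit⟩
    by_contra hd
    have : (mA &&& mB).testBit d = false :=
      Nat.testBit_lt_two_pow (Nat.lt_of_lt_of_le hand (Nat.pow_le_pow_right (by omega) (by omega)))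
    rw [this] at hbit; cases hbit

-- ---- ds = myList.map bDigits lookups, and B's loop guard ----

lemma mapGetD (l : List Int) (i : Nat) (hi : i < l.length) :
    (l.map bDigits).getD i PySem.Set.empty = bDigits (l.getD i 0) := by
  rw [List.getD_eq_getElem?_getD, List.getD_eq_getElem?_getD, List.getElem?_map,
      List.getElem?_eq_getElem hi]
  rfl

lemma bGuard (l : List Int) (i : Nat) (h1 : i + 1 < l.length) :
    (2 ≤ PySem.Set.len (PySem.Set.inter ((l.map bDigits).getD (i + 1 - 1) PySem.Set.empty)
        ((l.map bDigits).getD (i + 1) PySem.Set.empty))) ↔ pairMatch l i = true := by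
  rw [show i + 1 - 1 = i from rfl, mapGetD l i (by omega), mapGetD l (i + 1) h1]
  rw [pairMatch, Bool.and_eq_true, decide_eq_true_eq, commonDigits_eq, decide_eq_true_eq]
  constructor
  · exact fun h => ⟨h1, h⟩
  · exact fun h => h.2


-- ---- the main loop invariant: A's rescan-from-every-start fold equals B's single pass ----

lemma stop_eq (l : List Int) (i mxA posA bl be c : Nat)
    (hR : runLen l i = 0) (hcb : c ≤ bl)
    (h3 : c = 0 → mxA = bl ∧ posA = be)
    (h4 : c ≠ 0 → bl ≤ mxA ∧ c + runLen l i ≤ mxA ∧ (mxA = bl ∨ mxA = c + runLen l i) ∧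
      ((bl < c + runLen l i ∧ posA = i + runLen l i) ∨ (¬ bl < c + runLen l i ∧ posA = be))) :
    (mxA, posA) = (bl, be) := by
  by_cases hc : c = 0
  · obtain ⟨h1, h2⟩ := h3 hc; rw [h1, h2]
  · obtain ⟨hb, hcr, hd, hp⟩ := h4 hc
    rw [hR] at hcr hd hp
    simp only [Prod.mk.injEq]
    omega

lemma main_inv (l : List Int) : ∀ (k i mxA posA bl be c : Nat),
    l.length - i ≤ k → c ≤ bl →
    (c = 0 → mxA = bl ∧ posA = be) →
    (c ≠ 0 → bl ≤ mxA ∧ c + runLen l i ≤ mxA ∧ (mxA = bl ∨ mxA = c + runLen l i) ∧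
      ((bl < c + runLen l i ∧ posA = i + runLen l i) ∨ (¬ bl < c + runLen l i ∧ posA = be))) →
    aOuter l i mxA posA = bLoop l (l.map bDigits) (i + 1) bl be c := by
  intro k
  induction k with
  | zero =>
    intro i mxA posA bl be c hk hcb h3 h4
    have hR : runLen l i = 0 := runLen_of_false (pairMatch_of_oob (by omega))
    rw [aOuter, if_neg (by omega), bLoop, if_neg (by omega)]
    exact stop_eq l i mxA posA bl be c hR hcb h3 h4
  | succ k ih =>
    intro i mxA posA bl be c hk hcb h3 h4
    have hp : aInner l i 0 = (i + runLen l i, 0 + runLen l i) :=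
      aInner_eq l l.length i 0 (by omega)
    by_cases hi : i < l.length
    · by_cases hi1 : i + 1 < l.length
      · rw [aOuter, if_pos hi, hp, bLoop, if_pos hi1]
        by_cases hg : pairMatch l i = true
        · have hR : runLen l i = runLen l (i + 1) + 1 := runLen_of_true hg
          rw [if_pos ((bGuard l i hi1).mpr hg)]
          by_cases hA : (i + runLen l i, 0 + runLen l i).2 > mxA
          · rw [if_pos hA]
            simp only [Nat.zero_add] at hA ⊢
            by_cases hB : c + 1 > bl
            · rw [if_pos hB]
              exact ih (i + 1) (runLen l i) (i + runLen l i) (c + 1) (i + 1) (c + 1)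
                (by omega) (by omega) (by omega) (by omega)
            · rw [if_neg hB]
              exact ih (i + 1) (runLen l i) (i + runLen l i) bl be (c + 1)
                (by omega) (by omega) (by omega) (by omega)
          · rw [if_neg hA]
            simp only [Nat.zero_add] at hA
            by_cases hB : c + 1 > bl
            · rw [if_pos hB]
              exact ih (i + 1) mxA posA (c + 1) (i + 1) (c + 1)
                (by omega) (by omega) (by omega) (by omega)
            · rw [if_neg hB]
              exact ih (i + 1) mxA posA bl be (c + 1)
                (by omega) (by omega) (by omega) (by omega)
        · have hR : runLen l i = 0 := runLen_of_false (by
            cases hgb : pairMatch l i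
            · rfl
            · exact absurd hgb hg)
          rw [if_neg (fun hx => hg ((bGuard l i hi1).mp hx))]
          rw [if_neg (by simp [hR])]
          exact ih (i + 1) mxA posA bl be 0 (by omega) (by omega) (by omega) (by omega)
      · have hR : runLen l i = 0 := runLen_of_false (pairMatch_of_oob hi1)
        rw [aOuter, if_pos hi, hp, if_neg (by simp [hR])]
        rw [aOuter, if_neg (by omega), bLoop, if_neg hi1]
        exact stop_eq l i mxA posA bl be c hR hcb h3 h4
    · have hR : runLen l i = 0 := runLen_of_false (pairMatch_of_oob (by omega))
      rw [aOuter, if_neg hi, bLoop, if_neg (by omega)]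
      exact stop_eq l i mxA posA bl be c hR hcb h3 h4

-- ===== VERDICT (by name: the statement is the Claim_ definition above) =====
theorem longestCommonDigits_spec : Claim_equal_longestCommonDigits := by
  intro l _
  unfold Spec_longestCommonDigits
  simp only [longestCommonDigits, longestCommonDigits_alt]
  rw [main_inv l l.length 0 0 0 0 0 0 (by omega) (by omega)
    (fun _ => ⟨rfl, rfl⟩) (fun hc => absurd rfl hc)]
  simp
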